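-- pv_equiv track=rewrite | github.com/wan-catherine/Leetcode | problems/N835_Image_Overlap.py | largestOverlap_brute_force
-- ===== SOURCE A (Python) =====
-- def largestOverlap_brute_force(A, B):
--     """
--     :type A: List[List[int]]
--     :type B: List[List[int]]
--     :rtype: int
--     """
--     length = len(A)
--     res = 0
--     for dx in range(-length+1, length):
--         for dy in range(-length+1, length):
--             count = 0
--             for ax in range(length):
--                 bx = ax + dx
--                 if bx < 0 or bx >= length:
--                     continue
--                 for ay in range(length):
--                     by = ay + dy
--                     if by < 0 or by >= length:
--                         continue
--                     if A[ax][ay] + B[bx][by] == 2: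
--                         count += 1
--             res = max(res, count)
--     return res
-- ===== SOURCE B (Python) =====
-- def largestOverlap_brute_force(A, B):
--     length = len(A)
--     by_val = {}
--     for bx in range(length):
--         for by in range(length):
--             by_val.setdefault(B[bx][by], []).append((bx, by))
--     counter = {}
--     for ax in range(length):
--         for ay in range(length):
--             for (bx, by) in by_val.get(2 - A[ax][ay], []):
--                 d = (bx - ax, by - ay)
--                 counter[d] = counter.get(d, 0) + 1
--     return max(counter.values(), default=0)
-- ===== Notes on version B (the rewrite author's own statement) =====
-- stated objective: faster
-- what changed: A scans all (2n-1)^2 shifts with a full O(n^2) grid pass each (O(n^4)); B indexes B's cells by value in a dict, then for each A-cell walks only the B-cells whose values sum to 2 with it, tallying translation vectors in a counter and returning the largest tally.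
import Mathlib
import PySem

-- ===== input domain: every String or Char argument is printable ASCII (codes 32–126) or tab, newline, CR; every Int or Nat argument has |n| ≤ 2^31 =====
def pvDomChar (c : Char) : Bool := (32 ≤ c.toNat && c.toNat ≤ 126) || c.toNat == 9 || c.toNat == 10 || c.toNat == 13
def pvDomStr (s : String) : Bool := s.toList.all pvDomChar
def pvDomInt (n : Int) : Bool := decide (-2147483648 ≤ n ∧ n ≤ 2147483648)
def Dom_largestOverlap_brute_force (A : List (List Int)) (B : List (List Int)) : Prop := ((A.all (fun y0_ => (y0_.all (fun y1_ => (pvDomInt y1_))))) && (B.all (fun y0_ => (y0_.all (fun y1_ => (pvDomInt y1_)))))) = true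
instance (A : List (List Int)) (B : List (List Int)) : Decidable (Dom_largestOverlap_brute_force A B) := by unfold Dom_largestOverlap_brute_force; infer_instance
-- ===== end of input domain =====

-- B replaces A's O(n^4) scan over all shifts by counting, for every pair of a matching
-- A-cell and B-cell (values summing to 2), the translation vector between them in a
-- counter dict (B-cells pre-indexed by value), and returns the largest multiplicity.

-- shared grid indexing helper: G[x][y]; Pre_ keeps both indices in range, so the
-- defaults are never reached on admitted inputs (Python raises IndexError there)
def pvCell (G : List (List Int)) (x y : Int) : Int :=
  PySem.List.pyGetD (PySem.List.pyGetD G x []) y 0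

-- ===== PORT A =====
def largestOverlap_brute_force (A : List (List Int)) (B : List (List Int)) : Int :=
  let length : Int := (A.length : Int)
  (PySem.List.pyRange (-length + 1) length).foldl (fun res dx =>
    (PySem.List.pyRange (-length + 1) length).foldl (fun res dy =>
      let count :=
        (PySem.List.pyRange 0 length).foldl (fun count ax =>
          let bx := ax + dx
          if bx < 0 ∨ bx ≥ length then count
          else
            (PySem.List.pyRange 0 length).foldl (fun count ay =>
              let by_ := ay + dy
              if by_ < 0 ∨ by_ ≥ length then count
              else if pvCell A ax ay + pvCell B bx by_ == 2 then count + 1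
              else count) count) 0
      max res count) res) 0

-- ===== PORT B =====
def largestOverlap_brute_force_alt (A : List (List Int)) (B : List (List Int)) : Int :=
  let length : Int := (A.length : Int)
  let byVal : PySem.Dict Int (List (Int × Int)) :=
    (PySem.List.pyRange 0 length).foldl (fun d bx =>
      (PySem.List.pyRange 0 length).foldl (fun d by_ =>
        d.modify (pvCell B bx by_) [] (· ++ [(bx, by_)])) d) PySem.Dict.empty
  let counter : PySem.Dict (Int × Int) Int :=
    (PySem.List.pyRange 0 length).foldl (fun c ax =>
      (PySem.List.pyRange 0 length).foldl (fun c ay =>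
        (byVal.getD (2 - pvCell A ax ay) []).foldl (fun c p =>
          let d := (p.1 - ax, p.2 - ay)
          c.insert d (c.getD d 0 + 1)) c) c) PySem.Dict.empty
  PySem.List.maxD counter.values (fun v => v) 0

-- ===== PRECONDITION & SPEC =====
-- Pre_ excludes exactly the inputs where Python A raises IndexError: it reads
-- A[ax][ay] and B[bx][by] for all indices in [0, len(A)), so every row of A, the
-- first len(A) rows of B (which must exist), must have length ≥ len(A).
def Pre_largestOverlap_brute_force (A : List (List Int)) (B : List (List Int)) : Prop :=
  A.length ≤ B.length ∧ (∀ r ∈ A, A.length ≤ r.length) ∧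
    (∀ r ∈ B.take A.length, A.length ≤ r.length)
instance (A : List (List Int)) (B : List (List Int)) : Decidable (Pre_largestOverlap_brute_force A B) := by unfold Pre_largestOverlap_brute_force; infer_instance

def pvWitness_largestOverlap_brute_force : List (List Int) × List (List Int) :=
  ([[1, 0], [0, 1]], [[0, 1], [1, 0]])

def Spec_largestOverlap_brute_force (A : List (List Int)) (B : List (List Int)) (out : Int) : Prop := out = largestOverlap_brute_force_alt A B
instance (A : List (List Int)) (B : List (List Int)) (out : Int) : Decidable (Spec_largestOverlap_brute_force A B out) := by unfold Spec_largestOverlap_brute_force; infer_instance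

-- ===== CLAIM (what is proved, stated in full; the proofs are below) =====
def Claim_equal_largestOverlap_brute_force : Prop := ∀ (A : List (List Int)) (B : List (List Int)), Dom_largestOverlap_brute_force A B → Pre_largestOverlap_brute_force A B → Spec_largestOverlap_brute_force A B (largestOverlap_brute_force A B)

-- ===== LEMMAS AND PROOFS =====

-- proof-side abbreviations
def pvR (N : Int) : List Int := PySem.List.pyRange 0 N

def pvBCells (Bm : List (List Int)) (N : Int) : List (Int × (Int × Int)) :=
  (pvR N).flatMap (fun bx => (pvR N).map (fun by_ => (pvCell Bm bx by_, (bx, by_))))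

def pvMatches (Bm : List (List Int)) (N v : Int) : List (Int × Int) :=
  (((pvBCells Bm N).filter (fun p => p.1 == v)).map (fun p => p.2))

def pvDiffs (Am Bm : List (List Int)) (N : Int) : List (Int × Int) :=
  (pvR N).flatMap (fun ax => (pvR N).flatMap (fun ay =>
    (pvMatches Bm N (2 - pvCell Am ax ay)).map (fun p => (p.1 - ax, p.2 - ay))))

def pvC (Am Bm : List (List Int)) (N dx dy : Int) : Int :=
  (pvR N).foldl (fun count ax =>
    if ax + dx < 0 ∨ ax + dx ≥ N then count
    else (pvR N).foldl (fun count ay =>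
      if ay + dy < 0 ∨ ay + dy ≥ N then count
      else if pvCell Am ax ay + pvCell Bm (ax + dx) (ay + dy) == 2 then count + 1
      else count) count) 0

-- generic loop-shape lemmas
lemma pvFoldl_nested_map {α β γ δ : Type} (l1 : List α) (g : α → List β)
    (k : α → β → γ) (f : δ → γ → δ) (init : δ) :
    l1.foldl (fun acc x => (g x).foldl (fun a y => f a (k x y)) acc) init
      = (l1.flatMap (fun x => (g x).map (k x))).foldl f init := by
  rw [List.foldl_flatMap]
  congr 1; funext acc x; rw [List.foldl_map]

lemma pvFoldl_add_eq {α : Type} (l : List α) (f : Int → α → Int) (g : α → Int)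
    (h : ∀ acc x, f acc x = acc + g x) (a : Int) :
    l.foldl f a = a + (l.map g).sum := by
  induction l generalizing a with
  | nil => simp
  | cons x t ih => simp only [List.foldl_cons, List.map_cons, List.sum_cons, h, ih]; ring

lemma pvCountP_pin (l : List Int) (hl : l.Nodup) (t : Int) (p : Int → Bool)
    (q : Int → Bool) (hq : ∀ x, q x = true ↔ (x = t ∧ p t = true)) :
    l.countP q = if t ∈ l ∧ p t = true then 1 else 0 := by
  induction l with
  | nil => simp
  | cons a l ih =>
    have hnd := (List.nodup_cons.mp hl)
    rw [List.countP_cons, ih hnd.2]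
    by_cases hat : a = t
    · subst hat
      by_cases hp : p a = true
      · simp [hq, hp, hnd.1]
      · simp [hq, hp]
    · have : q a = false := by
        by_contra hqa
        exact hat ((hq a).mp (by simpa using hqa)).1
      simp [this, List.mem_cons]
      by_cases htl : t ∈ l <;> simp [htl, Ne.symm hat]
  
lemma pvSum_pin (l : List Int) (hl : l.Nodup) (t : Int) (g : Int → Nat)
    (h : ∀ x ∈ l, x ≠ t → g x = 0) :
    (l.map g).sum = if t ∈ l then g t else 0 := by
  induction l with
  | nil => simp
  | cons a l ih =>
    have hnd := (List.nodup_cons.mp hl)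
    rw [List.map_cons, List.sum_cons, ih hnd.2 (fun x hx => h x (List.mem_cons_of_mem a hx))]
    by_cases hat : a = t
    · rw [hat] at hnd ⊢
      simp [hnd.1]
    · have hga : g a = 0 := h a (List.mem_cons_self) hat
      rw [hga]
      by_cases htl : t ∈ l <;> simp [htl, List.mem_cons] <;>
        exact fun h' => absurd h'.symm hat

-- the indicator both sides compute, per (ax, ay)
def pvInd (Am Bm : List (List Int)) (N dx dy ax ay : Int) : Int :=
  if 0 ≤ ax + dx ∧ ax + dx < N ∧ 0 ≤ ay + dy ∧ ay + dy < N ∧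
      pvCell Am ax ay + pvCell Bm (ax + dx) (ay + dy) = 2 then 1 else 0

lemma pvC_eq_sum (Am Bm : List (List Int)) (N dx dy : Int) :
    pvC Am Bm N dx dy
      = ((pvR N).map (fun ax => ((pvR N).map (fun ay => pvInd Am Bm N dx dy ax ay)).sum)).sum := by
  rw [pvC]
  rw [pvFoldl_add_eq (pvR N) _
      (fun ax => if ax + dx < 0 ∨ ax + dx ≥ N then 0
        else ((pvR N).map (fun ay => pvInd Am Bm N dx dy ax ay)).sum) ?hout 0]
  case hout =>
    intro acc ax
    dsimp only
    by_cases hbx : ax + dx < 0 ∨ ax + dx ≥ N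
    · simp [hbx]
    · rw [if_neg hbx, if_neg hbx]
      have hin : ∀ (acc2 ay : Int),
          (if ay + dy < 0 ∨ ay + dy ≥ N then acc2
           else if (pvCell Am ax ay + pvCell Bm (ax + dx) (ay + dy) == 2) = true then acc2 + 1
           else acc2) = acc2 + pvInd Am Bm N dx dy ax ay := by
        intro acc2 ay
        rw [pvInd]
        split_ifs <;> simp_all <;> omega
      rw [pvFoldl_add_eq (pvR N)
          (fun count ay => if ay + dy < 0 ∨ ay + dy ≥ N then count
            else if (pvCell Am ax ay + pvCell Bm (ax + dx) (ay + dy) == 2) = true then count + 1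
            else count)
          (fun ay => pvInd Am Bm N dx dy ax ay) hin acc]
  rw [zero_add]
  refine congrArg List.sum (List.map_congr_left fun ax hax => ?_)
  by_cases hbx : ax + dx < 0 ∨ ax + dx ≥ N
  · rw [if_pos hbx]
    have hz : ∀ ay ∈ pvR N, pvInd Am Bm N dx dy ax ay = 0 := by
      intro ay _
      rw [pvInd, if_neg]
      omega
    rw [List.map_congr_left hz]
    simp
  · rw [if_neg hbx]

lemma pvPairCount (Am Bm : List (List Int)) (N dx dy ax ay : Int) :
    ((pvMatches Bm N (2 - pvCell Am ax ay)).map (fun p => (p.1 - ax, p.2 - ay))).count (dx, dy)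
      = if 0 ≤ ax + dx ∧ ax + dx < N ∧ 0 ≤ ay + dy ∧ ay + dy < N ∧
          pvCell Am ax ay + pvCell Bm (ax + dx) (ay + dy) = 2 then 1 else 0 := by
  rw [List.count_eq_countP, List.countP_map, pvMatches, List.countP_map, List.countP_filter,
    pvBCells, List.countP_flatMap]
  have hclean : ∀ bx ∈ pvR N,
      ((List.countP fun a =>
          (((fun x => x == (dx, dy)) ∘ fun p => (p.1 - ax, p.2 - ay)) ∘
            fun p : Int × (Int × Int) => p.2) a &&
            a.1 == 2 - pvCell Am ax ay) ∘
        fun bx => List.map (fun by_ => (pvCell Bm bx by_, bx, by_)) (pvR N)) bx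
      = if 0 ≤ ay + dy ∧ ay + dy < N ∧ bx - ax = dx ∧
            pvCell Bm bx (ay + dy) = 2 - pvCell Am ax ay then 1 else 0 := by
    intro bx _
    simp only [Function.comp_apply]
    rw [List.countP_map]
    rw [pvCountP_pin (pvR N) (PySem.List.nodup_pyRange_one 0 N) (ay + dy)
        (fun t => decide (bx - ax = dx ∧ pvCell Bm bx t = 2 - pvCell Am ax ay)) _ ?hq]
    case hq =>
      intro x
      simp only [Function.comp_apply, beq_iff_eq, Prod.mk.injEq, Bool.and_eq_true,
        decide_eq_true_eq]
      constructor
      · rintro ⟨⟨h1, h2⟩, h3⟩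
        have hx : x = ay + dy := by omega
        subst hx
        exact ⟨rfl, h1, h3⟩
      · rintro ⟨hx, h1, h3⟩
        subst hx
        exact ⟨⟨h1, by ring⟩, h3⟩
    · simp only [pvR, PySem.List.mem_pyRange_one, decide_eq_true_eq]
      split_ifs <;> first | rfl | tauto
  rw [List.map_congr_left hclean]
  rw [pvSum_pin (pvR N) (PySem.List.nodup_pyRange_one 0 N) (ax + dx)
      (fun bx => if 0 ≤ ay + dy ∧ ay + dy < N ∧ bx - ax = dx ∧
          pvCell Bm bx (ay + dy) = 2 - pvCell Am ax ay then 1 else 0) ?hzero]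
  case hzero =>
    intro x _ hne
    dsimp only
    rw [if_neg]
    omega
  simp only [pvR, PySem.List.mem_pyRange_one]
  split_ifs <;> first | rfl | omega

lemma pvCount_eq_sum (Am Bm : List (List Int)) (N dx dy : Int) :
    (((pvDiffs Am Bm N).count (dx, dy) : Int))
      = ((pvR N).map (fun ax => ((pvR N).map (fun ay => pvInd Am Bm N dx dy ax ay)).sum)).sum := by
  rw [pvDiffs, List.count_flatMap, Nat.cast_list_sum, List.map_map]
  refine congrArg List.sum (List.map_congr_left fun ax hax => ?_)
  simp only [Function.comp_apply]
  rw [List.count_flatMap, Nat.cast_list_sum, List.map_map]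
  refine congrArg List.sum (List.map_congr_left fun ay hay => ?_)
  simp only [Function.comp_apply]
  rw [pvPairCount, pvInd]
  split_ifs <;> simp

lemma pvC_eq_count (Am Bm : List (List Int)) (N dx dy : Int) :
    pvC Am Bm N dx dy = ((pvDiffs Am Bm N).count (dx, dy) : Int) := by
  rw [pvC_eq_sum, pvCount_eq_sum]

lemma pvA_eq (A B : List (List Int)) :
    largestOverlap_brute_force A B
      = ((PySem.List.pyRange (-(A.length : Int) + 1) (A.length : Int)).flatMap (fun dx =>
          (PySem.List.pyRange (-(A.length : Int) + 1) (A.length : Int)).map (fun dy =>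
            pvC A B (A.length : Int) dx dy))).foldl max 0 := by
  unfold largestOverlap_brute_force
  rw [← pvFoldl_nested_map (l1 := PySem.List.pyRange (-(A.length : Int) + 1) (A.length : Int))
      (g := fun _ => PySem.List.pyRange (-(A.length : Int) + 1) (A.length : Int))
      (k := fun dx dy => pvC A B (A.length : Int) dx dy) (f := max) (init := (0 : Int))]
  rfl

lemma pvB_eq (A B : List (List Int)) :
    largestOverlap_brute_force_alt A B
      = PySem.List.maxD (PySem.Dict.counter (pvDiffs A B (A.length : Int))).values (fun v => v) 0 := by
  unfold largestOverlap_brute_force_alt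
  have hbv : ∀ v : Int,
      (List.foldl (fun d bx => List.foldl
          (fun d by_ => d.modify (pvCell B bx by_) [] (· ++ [(bx, by_)])) d
          (PySem.List.pyRange 0 (A.length : Int))) PySem.Dict.empty
          (PySem.List.pyRange 0 (A.length : Int))).getD v []
        = pvMatches B (A.length : Int) v := by
    intro v
    have hb : List.foldl (fun (d : PySem.Dict Int (List (Int × Int))) p =>
          d.modify p.1 [] (· ++ [p.2])) PySem.Dict.empty (pvBCells B (A.length : Int))
        = List.foldl (fun d bx => List.foldl
            (fun d by_ => d.modify (pvCell B bx by_) [] (· ++ [(bx, by_)])) d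
            (PySem.List.pyRange 0 (A.length : Int))) PySem.Dict.empty
            (PySem.List.pyRange 0 (A.length : Int)) := by
      rw [pvBCells]
      simp only [List.foldl_flatMap, List.foldl_map]
      rfl
    rw [← hb, PySem.Dict.getD_foldl_modify_append]
    rw [pvMatches]
    rfl
  dsimp only
  simp only [hbv]
  rw [← PySem.Dict.foldl_insert_getD_add_one_eq_counter, pvDiffs]
  simp only [List.foldl_flatMap, List.foldl_map]
  rfl

lemma pvMem_diffs_bounds (Am Bm : List (List Int)) (N : Int) (d : Int × Int)
    (hd : d ∈ pvDiffs Am Bm N) :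
    -N + 1 ≤ d.1 ∧ d.1 < N ∧ -N + 1 ≤ d.2 ∧ d.2 < N := by
  simp only [pvDiffs, pvMatches, pvBCells, List.mem_flatMap, List.mem_map, List.mem_filter,
    pvR, PySem.List.mem_pyRange_one] at hd
  obtain ⟨ax, ⟨hax0, hax1⟩, ay, ⟨hay0, hay1⟩, p,
    ⟨q, ⟨⟨bx, ⟨hbx0, hbx1⟩, by_, ⟨hby0, hby1⟩, hq⟩, -⟩, hpq⟩, hpd⟩ := hd
  subst hq
  subst hpq
  subst hpd
  dsimp only
  omega

lemma pvMain (A B : List (List Int)) :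
    largestOverlap_brute_force A B = largestOverlap_brute_force_alt A B := by
  rw [pvA_eq, pvB_eq, PySem.List.maxD]
  have hvals : (PySem.Dict.counter (pvDiffs A B (A.length : Int))).values
      = (PySem.Set.ofList (pvDiffs A B (A.length : Int))).map
          (fun k => ((pvDiffs A B (A.length : Int)).count k : Int)) := by
    simp only [PySem.Dict.values, PySem.Dict.items_counter, List.map_map]
    rfl
  have hLA : ∀ y : Int,
      (y ∈ (PySem.List.pyRange (-(A.length : Int) + 1) (A.length : Int)).flatMap (fun dx =>
          (PySem.List.pyRange (-(A.length : Int) + 1) (A.length : Int)).map (fun dy =>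
            pvC A B (A.length : Int) dx dy))
        ↔ ∃ dx dy : Int, (-(A.length : Int) + 1 ≤ dx ∧ dx < (A.length : Int)) ∧
            (-(A.length : Int) + 1 ≤ dy ∧ dy < (A.length : Int)) ∧
            y = pvC A B (A.length : Int) dx dy) := by
    intro y
    simp only [List.mem_flatMap, List.mem_map, PySem.List.mem_pyRange_one]
    constructor
    · rintro ⟨dx, hdx, dy, hdy, rfl⟩
      exact ⟨dx, dy, hdx, hdy, rfl⟩
    · rintro ⟨dx, dy, hdx, hdy, rfl⟩
      exact ⟨dx, hdx, dy, hdy, rfl⟩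
  cases hmx : PySem.List.max?
      (PySem.Dict.counter (pvDiffs A B (A.length : Int))).values (fun v => v) with
  | none =>
    have hveq := (PySem.List.max?_eq_none_iff _ _).mp hmx
    rw [hvals] at hveq
    have hde : pvDiffs A B (A.length : Int) = [] := by
      rcases List.map_eq_nil_iff.mp hveq with hof
      rw [List.eq_nil_iff_forall_not_mem]
      intro x hx
      have := (PySem.Set.mem_ofList (xs := pvDiffs A B (A.length : Int)) (y := x)).mpr hx
      simp [hof] at this
    rcases PySem.List.foldl_max_mem ((PySem.List.pyRange (-(A.length : Int) + 1) (A.length : Int)).flatMap (fun dx =>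
          (PySem.List.pyRange (-(A.length : Int) + 1) (A.length : Int)).map (fun dy =>
            pvC A B (A.length : Int) dx dy))) 0 with h0 | hmem
    · rw [h0]; rfl
    · rcases (hLA _).mp hmem with ⟨dx, dy, _, _, hy⟩
      rw [hy, pvC_eq_count, hde]
      rfl
  | some m =>
    have hm_mem := PySem.List.max?_mem hmx
    rw [hvals] at hm_mem
    rcases List.mem_map.mp hm_mem with ⟨k, hk_set, rfl⟩
    have hk_diffs : k ∈ pvDiffs A B (A.length : Int) := (PySem.Set.mem_ofList _ _).mp hk_set
    have hk_pos : 0 < (pvDiffs A B (A.length : Int)).count k := List.count_pos_iff.mpr hk_diffs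
    have hkb := pvMem_diffs_bounds A B (A.length : Int) k hk_diffs
    have hmLA : ((pvDiffs A B (A.length : Int)).count k : Int)
        ∈ (PySem.List.pyRange (-(A.length : Int) + 1) (A.length : Int)).flatMap (fun dx =>
            (PySem.List.pyRange (-(A.length : Int) + 1) (A.length : Int)).map (fun dy =>
              pvC A B (A.length : Int) dx dy)) := by
      refine (hLA _).mpr ⟨k.1, k.2, ⟨hkb.1, hkb.2.1⟩, ⟨hkb.2.2.1, hkb.2.2.2⟩, ?_⟩
      rw [pvC_eq_count]
    show _ = ((pvDiffs A B (A.length : Int)).count k : Int)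
    apply le_antisymm
    · rcases PySem.List.foldl_max_mem ((PySem.List.pyRange (-(A.length : Int) + 1) (A.length : Int)).flatMap (fun dx =>
          (PySem.List.pyRange (-(A.length : Int) + 1) (A.length : Int)).map (fun dy =>
            pvC A B (A.length : Int) dx dy))) 0 with h0 | hmem
      · rw [h0]
        positivity
      · rcases (hLA _).mp hmem with ⟨dx, dy, _, _, hy⟩
        rw [hy, pvC_eq_count]
        by_cases hdz : (dx, dy) ∈ pvDiffs A B (A.length : Int)
        · have hv_mem : ((pvDiffs A B (A.length : Int)).count (dx, dy) : Int)
              ∈ (PySem.Dict.counter (pvDiffs A B (A.length : Int))).values := by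
            rw [hvals]
            exact List.mem_map.mpr ⟨(dx, dy), (PySem.Set.mem_ofList _ _).mpr hdz, rfl⟩
          exact PySem.List.max?_isMax hmx _ hv_mem
        · have : (pvDiffs A B (A.length : Int)).count (dx, dy) = 0 :=
            List.count_eq_zero.mpr hdz
          rw [this]
          positivity
    · exact (PySem.List.le_foldl_max _ _).2 _ hmLA

-- ===== VERDICT (by name: the statement is the Claim_ definition above) =====
theorem largestOverlap_brute_force_spec : Claim_equal_largestOverlap_brute_force := by
  intro A B _ _
  unfold Spec_largestOverlap_brute_force
  exact pvMain A B
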